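-- pv_equiv track=rewrite | github.com/min1018/algorithm-study-2022-2 | 4주차/더맵게.py | solution
-- ===== SOURCE A (Python) =====
-- from heapq import heappop, heappush, heapify
--
-- def solution(sco, K):
--     num = 0
--     sco.sort()
--     heapify(sco)
--     while True:
--         if(sco[0] >= K):
--             break
--         if(len(sco) == 1):
--             num = -1
--             break
--         heappush(sco, heappop(sco) + (heappop(sco) *2))
--         num += 1
--
--     return num
-- ===== SOURCE B (Python) =====
-- def solution(sco, K):
--     # Two-queue technique: sort once; merged values go to a FIFO whose pushes are
--     # non-decreasing, so the minimum is always the smaller of the two queue fronts.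
--     # Return-value equivalent to A only: A sorts/heapifies/pops sco in place, B does not mutate it.
--     base = sorted(sco)
--     merged = []
--     i = 0
--     j = 0
--     num = 0
--     while True:
--         if i < len(base) and (j == len(merged) or base[i] <= merged[j]):
--             mn = base[i]
--         else:
--             mn = merged[j]
--         if mn >= K:
--             return num
--         if len(base) - i + len(merged) - j == 1:
--             return -1
--         if i < len(base) and (j == len(merged) or base[i] <= merged[j]):
--             a = base[i]
--             i += 1
--         else:
--             a = merged[j]
--             j += 1
--         if i < len(base) and (j == len(merged) or base[i] <= merged[j]):
--             b = base[i]
--             i += 1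
--         else:
--             b = merged[j]
--             j += 1
--         merged.append(a + 2 * b)
--         num += 1
-- ===== Notes on version B (the rewrite author's own statement) =====
-- stated objective: faster
-- what changed: Replaces the binary heap by the two-queue technique: sort once, then keep newly merged values in a FIFO whose pushes are provably non-decreasing, so each minimum is the smaller of the two queue fronts and every queue operation is O(1) with no heap sifting.
import Mathlib
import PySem

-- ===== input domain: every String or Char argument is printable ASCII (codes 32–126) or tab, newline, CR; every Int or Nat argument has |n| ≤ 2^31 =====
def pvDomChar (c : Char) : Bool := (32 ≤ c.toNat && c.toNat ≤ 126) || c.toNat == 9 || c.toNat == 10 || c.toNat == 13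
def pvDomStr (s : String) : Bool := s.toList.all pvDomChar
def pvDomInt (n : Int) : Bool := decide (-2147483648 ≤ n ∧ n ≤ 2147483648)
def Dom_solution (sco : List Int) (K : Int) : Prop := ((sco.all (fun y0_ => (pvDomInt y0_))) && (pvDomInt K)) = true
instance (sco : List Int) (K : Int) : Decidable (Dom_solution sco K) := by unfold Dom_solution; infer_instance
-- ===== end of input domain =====

-- B replaces A's binary heap by the two-queue technique: sort once, keep merged values in
-- a FIFO whose pushes are non-decreasing, take each minimum from the two queue fronts.
-- Equivalence is about the RETURN value only (A sorts/heapifies/pops `sco` in place, B does not mutate it).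

-- ===== PORT A =====
-- `heapq` is library code: it is ported as a functional binary min-heap (skew-heap merge)
-- helper whose heappop returns the minimum element — exact on the return value for Int
-- contents, which is all `solution` observes of the heap (sco[0], pops, and len).
inductive PyHeap where
  | nil : PyHeap
  | node : Int → PyHeap → PyHeap → PyHeap
deriving DecidableEq, Repr

def PyHeap.size : PyHeap → Nat
  | .nil => 0
  | .node _ l r => l.size + r.size + 1

-- fuel-based (structural) skew merge; fuel ≥ size h1 + size h2 makes the 0-case unreachable
def PyHeap.mergeF : Nat → PyHeap → PyHeap → PyHeap
  | 0, h1, _ => h1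
  | _ + 1, .nil, h => h
  | _ + 1, h, .nil => h
  | fuel + 1, .node a l1 r1, .node b l2 r2 =>
    if a ≤ b then .node a (PyHeap.mergeF fuel r1 (.node b l2 r2)) l1
    else .node b (PyHeap.mergeF fuel (.node a l1 r1) r2) l2

def PyHeap.merge (h1 h2 : PyHeap) : PyHeap := PyHeap.mergeF (h1.size + h2.size) h1 h2

def PyHeap.push (v : Int) (h : PyHeap) : PyHeap := PyHeap.merge (.node v .nil .nil) h

-- heapq.heapify ported as a fold of heappush over the list
def PyHeap.heapifyL (xs : List Int) : PyHeap := xs.foldl (fun h x => PyHeap.push x h) .nil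

-- the `while True` loop of A, fuel = heap size (each round shrinks the heap by one, so
-- fuel never runs out on the admitted inputs); .nil / fuel-0 fallbacks are unreachable
-- under Pre_solution (Python raises IndexError on an empty heap)
def solLoopA : Nat → Int → PyHeap → Int → Int
  | 0, _, _, num => num
  | fuel + 1, K, h, num =>
    match h with
    | .nil => num
    | .node a l r =>
      if a ≥ K then num
      else if (PyHeap.node a l r).size = 1 then -1
      else
        match PyHeap.merge l r with
        | .nil => num
        | .node b l2 r2 =>
            solLoopA fuel K (PyHeap.push (a + b * 2) (PyHeap.merge l2 r2)) (num + 1)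

def solution (sco : List Int) (K : Int) : Int :=
  solLoopA (PyHeap.heapifyL (PySem.List.sorted sco (fun x => x) false)).size K
    (PyHeap.heapifyL (PySem.List.sorted sco (fun x => x) false)) 0

-- ===== PORT B =====
-- B keeps two queues: the suffix of the sorted input and the FIFO of merged values; the
-- Lean state (bs, q) is Python's (base[i:], merged[j:]).  popQ is the repeated Python
-- branch `if i < len(base) and (j == len(merged) or base[i] <= merged[j])`: take the
-- smaller front (base preferred on ties); the (0, [], []) case is unreachable under
-- Pre_solution (Python raises IndexError there).
def popQ : List Int → List Int → Int × List Int × List Int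
  | [], [] => (0, [], [])
  | [], y :: q => (y, [], q)
  | x :: bs, [] => (x, bs, [])
  | x :: bs, y :: q => if x ≤ y then (x, bs, y :: q) else (y, x :: bs, q)

-- the `while True` loop of B, fuel = total number of elements (each round removes one)
def solLoopB : Nat → Int → List Int → List Int → Int → Int
  | 0, _, _, _, num => num
  | fuel + 1, K, bs, q, num =>
    if (popQ bs q).1 ≥ K then num
    else if bs.length + q.length = 1 then -1
    else
      let p1 := popQ bs q
      let p2 := popQ p1.2.1 p1.2.2
      solLoopB fuel K p2.2.1 (p2.2.2 ++ [p1.1 + 2 * p2.1]) (num + 1)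

def solution_alt (sco : List Int) (K : Int) : Int :=
  solLoopB (PySem.List.sorted sco (fun x => x) false).length K
    (PySem.List.sorted sco (fun x => x) false) [] 0

-- ===== PRECONDITION & SPEC =====
-- A raises IndexError (sco[0]) on the empty list; Pre_ excludes exactly that input.
def Pre_solution (sco : List Int) (K : Int) : Prop := sco ≠ []
instance (sco : List Int) (K : Int) : Decidable (Pre_solution sco K) := by unfold Pre_solution; infer_instance
def pvWitness_solution : List Int × Int := ([1, 2, 9, 3, 12], 7)

def Spec_solution (sco : List Int) (K : Int) (out : Int) : Prop := out = solution_alt sco K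
instance (sco : List Int) (K : Int) (out : Int) : Decidable (Spec_solution sco K out) := by unfold Spec_solution; infer_instance

-- ===== CLAIM (what is proved, stated in full; the proofs are below) =====
def Claim_equal_solution : Prop := ∀ (sco : List Int) (K : Int), Dom_solution sco K → Pre_solution sco K → Spec_solution sco K (solution sco K)

-- ===== LEMMAS AND PROOFS =====

-- abstract reference loop: A's greedy process on the explicitly sorted list; both ports
-- are proved equal to it
def insortR (v : Int) : List Int → List Int
  | [] => [v]
  | x :: xs => if v < x then v :: x :: xs else x :: insortR v xs

def solLoopL : Nat → Int → List Int → Int → Int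
  | 0, _, _, num => num
  | fuel + 1, K, l, num =>
    match l with
    | [] => num
    | [x] => if x ≥ K then num else -1
    | x :: y :: rest =>
        if x ≥ K then num
        else solLoopL fuel K (insortR (x + y * 2) rest) (num + 1)

-- ---------- A-side lemmas (heap ≍ sorted list) ----------

def PyHeap.toMS : PyHeap → Multiset Int
  | .nil => 0
  | .node a l r => a ::ₘ (l.toMS + r.toMS)

def PyHeap.Ordered : PyHeap → Prop
  | .nil => True
  | .node a l r => (∀ x ∈ l.toMS + r.toMS, a ≤ x) ∧ l.Ordered ∧ r.Ordered

theorem PyHeap.card_toMS (h : PyHeap) : h.toMS.card = h.size := by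
  induction h with
  | nil => simp [PyHeap.toMS, PyHeap.size]
  | node a l r ihl ihr => simp [PyHeap.toMS, PyHeap.size, ihl, ihr]

theorem PyHeap.root_le (a : Int) (l r : PyHeap) (ho : (PyHeap.node a l r).Ordered) :
    ∀ x ∈ (PyHeap.node a l r).toMS, a ≤ x := by
  intro x hx
  simp [PyHeap.toMS] at hx
  rcases hx with rfl | hx | hx
  · exact le_refl x
  · exact ho.1 x (by simp [hx])
  · exact ho.1 x (by simp [hx])

theorem PyHeap.toMS_mergeF (fuel : Nat) (h1 h2 : PyHeap) (hf : h1.size + h2.size ≤ fuel) :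
    (PyHeap.mergeF fuel h1 h2).toMS = h1.toMS + h2.toMS := by
  induction fuel generalizing h1 h2 with
  | zero =>
      cases h1 <;> cases h2 <;> simp [PyHeap.size] at hf ⊢ <;> simp [PyHeap.mergeF, PyHeap.toMS]
  | succ fuel ih =>
      cases h1 with
      | nil => simp [PyHeap.mergeF, PyHeap.toMS]
      | node a l1 r1 =>
        cases h2 with
        | nil => simp [PyHeap.mergeF, PyHeap.toMS]
        | node b l2 r2 =>
          simp only [PyHeap.size] at hf
          by_cases hab : a ≤ b
          · simp only [PyHeap.mergeF, hab, if_pos, PyHeap.toMS]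
            rw [ih r1 (.node b l2 r2) (by simp [PyHeap.size]; omega)]
            simp only [PyHeap.toMS, ← Multiset.singleton_add]
            abel
          · simp only [PyHeap.mergeF, hab, ite_false, PyHeap.toMS]
            rw [ih (.node a l1 r1) r2 (by simp [PyHeap.size]; omega)]
            simp only [PyHeap.toMS, ← Multiset.singleton_add]
            abel

theorem PyHeap.toMS_merge (h1 h2 : PyHeap) : (PyHeap.merge h1 h2).toMS = h1.toMS + h2.toMS :=
  PyHeap.toMS_mergeF _ h1 h2 (le_refl _)

theorem PyHeap.size_merge (h1 h2 : PyHeap) : (PyHeap.merge h1 h2).size = h1.size + h2.size := by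
  have := congrArg Multiset.card (PyHeap.toMS_merge h1 h2)
  simpa [PyHeap.card_toMS] using this

theorem PyHeap.ordered_mergeF (fuel : Nat) (h1 h2 : PyHeap) (hf : h1.size + h2.size ≤ fuel)
    (o1 : h1.Ordered) (o2 : h2.Ordered) : (PyHeap.mergeF fuel h1 h2).Ordered := by
  induction fuel generalizing h1 h2 with
  | zero => cases h1 <;> cases h2 <;> simp [PyHeap.size] at hf ⊢ <;> simp [PyHeap.mergeF] <;> trivial
  | succ fuel ih =>
      cases h1 with
      | nil => simpa [PyHeap.mergeF] using o2
      | node a l1 r1 =>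
        cases h2 with
        | nil => simpa [PyHeap.mergeF] using o1
        | node b l2 r2 =>
          simp only [PyHeap.size] at hf
          by_cases hab : a ≤ b
          · have hfr : r1.size + (PyHeap.node b l2 r2).size ≤ fuel := by
              simp [PyHeap.size]; omega
            simp only [PyHeap.mergeF, hab, if_pos]
            refine ⟨?_, ih r1 (.node b l2 r2) hfr o1.2.2 o2, o1.2.1⟩
            intro x hx
            rw [PyHeap.toMS_mergeF fuel r1 (.node b l2 r2) hfr] at hx
            simp at hx
            rcases hx with hx | hx
            · rcases hx with hx | hx
              · exact o1.1 x (by simp [hx])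
              · have := PyHeap.root_le b l2 r2 o2 x (by simpa [PyHeap.toMS] using hx)
                omega
            · exact o1.1 x (by simp [hx])
          · have hfr : (PyHeap.node a l1 r1).size + r2.size ≤ fuel := by
              simp [PyHeap.size]; omega
            simp only [PyHeap.mergeF, hab, ite_false]
            refine ⟨?_, ih (.node a l1 r1) r2 hfr o1 o2.2.2, o2.2.1⟩
            intro x hx
            rw [PyHeap.toMS_mergeF fuel (.node a l1 r1) r2 hfr] at hx
            simp at hx
            rcases hx with hx | hx
            · rcases hx with hx | hx
              · have := PyHeap.root_le a l1 r1 o1 x (by simpa [PyHeap.toMS] using hx)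
                omega
              · exact o2.1 x (by simp [hx])
            · exact o2.1 x (by simp [hx])

theorem PyHeap.ordered_merge (h1 h2 : PyHeap) (o1 : h1.Ordered) (o2 : h2.Ordered) :
    (PyHeap.merge h1 h2).Ordered :=
  PyHeap.ordered_mergeF _ h1 h2 (le_refl _) o1 o2

theorem PyHeap.toMS_push (v : Int) (h : PyHeap) : (PyHeap.push v h).toMS = v ::ₘ h.toMS := by
  simp [PyHeap.push, PyHeap.toMS_merge, PyHeap.toMS]

theorem PyHeap.ordered_push (v : Int) (h : PyHeap) (o : h.Ordered) : (PyHeap.push v h).Ordered := by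
  refine PyHeap.ordered_merge _ _ ?_ o
  exact ⟨by simp [PyHeap.toMS], trivial, trivial⟩

theorem heapifyL_invariant (xs : List Int) :
    (PyHeap.heapifyL xs).toMS = ↑xs ∧ (PyHeap.heapifyL xs).Ordered := by
  have : ∀ (xs : List Int) (h : PyHeap), h.Ordered →
      (xs.foldl (fun h x => PyHeap.push x h) h).toMS = h.toMS + ↑xs ∧
      (xs.foldl (fun h x => PyHeap.push x h) h).Ordered := by
    intro xs
    induction xs with
    | nil => intro h o; simpa using o
    | cons x t ih =>
        intro h o
        have := ih (PyHeap.push x h) (PyHeap.ordered_push x h o)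
        refine ⟨?_, this.2⟩
        rw [List.foldl_cons, this.1, PyHeap.toMS_push, ← Multiset.cons_coe, Multiset.add_cons,
          Multiset.cons_add]
  have h0 := this xs .nil trivial
  simpa [PyHeap.heapifyL, PyHeap.toMS] using h0

theorem insortR_coe (v : Int) (l : List Int) : (↑(insortR v l) : Multiset Int) = v ::ₘ ↑l := by
  induction l with
  | nil => simp [insortR]
  | cons x xs ih =>
      simp only [insortR]
      split
      · simp
      · rw [← Multiset.cons_coe, ← Multiset.cons_coe, ih]
        rw [Multiset.cons_swap]

theorem insortR_pairwise (v : Int) (l : List Int) (hs : l.Pairwise (· ≤ ·)) :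
    (insortR v l).Pairwise (· ≤ ·) := by
  induction l with
  | nil => simp [insortR]
  | cons x xs ih =>
      rcases List.pairwise_cons.mp hs with ⟨hx, hxs⟩
      simp only [insortR]
      split
      · rename_i hlt
        refine List.pairwise_cons.mpr ⟨?_, hs⟩
        intro y hy
        rcases hy with _ | hy
        · omega
        · have := hx y (by assumption)
          omega
      · rename_i hnlt
        refine List.pairwise_cons.mpr ⟨?_, ih hxs⟩
        intro y hy
        have hmem : y ∈ (↑(insortR v xs) : Multiset Int) := by simpa using hy
        rw [insortR_coe] at hmem
        simp at hmem
        rcases hmem with rfl | hmem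
        · omega
        · exact hx y hmem

-- head of a sorted list = root of an ordered heap with the same multiset
theorem head_eq_root (a : Int) (l r : PyHeap) (x : Int) (t : List Int)
    (ho : (PyHeap.node a l r).Ordered)
    (hms : (PyHeap.node a l r).toMS = ↑(x :: t))
    (hs : (x :: t).Pairwise (· ≤ ·)) : x = a := by
  have hax : a ≤ x := by
    have : x ∈ (PyHeap.node a l r).toMS := by rw [hms]; simp
    exact PyHeap.root_le a l r ho x this
  have hxa : x ≤ a := by
    have ha : a ∈ (↑(x :: t) : Multiset Int) := by
      rw [← hms]; simp [PyHeap.toMS]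
    simp at ha
    rcases ha with rfl | ha
    · exact le_refl _
    · exact (List.pairwise_cons.mp hs).1 a ha
  omega

theorem loop_eq (n : Nat) : ∀ (K : Int) (h : PyHeap) (l : List Int) (num : Int),
    h.size = n → h.Ordered → h.toMS = ↑l → l.Pairwise (· ≤ ·) →
    solLoopA n K h num = solLoopL n K l num := by
  induction n with
  | zero => intro K h l num hsz ho hms hs; rfl
  | succ n ih =>
      intro K h l num hsz ho hms hs
      cases h with
      | nil => simp [PyHeap.size] at hsz
      | node a hl hr =>
        cases l with
        | nil =>
            have hc := congrArg Multiset.card hms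
            rw [PyHeap.card_toMS, hsz] at hc
            simp at hc
        | cons x t =>
          have hxa : a = x := (head_eq_root a hl hr x t ho hms hs).symm
          subst hxa
          have hlen : t.length + 1 = n + 1 := by
            have hc := congrArg Multiset.card hms
            rw [PyHeap.card_toMS, hsz] at hc
            simpa using hc.symm
          by_cases hK : a ≥ K
          · cases t <;> simp [solLoopA, solLoopL, hK]
          · by_cases h1 : (PyHeap.node a hl hr).size = 1
            · -- single element: both return -1
              have ht : t = [] := by
                have : t.length = 0 := by rw [hsz] at h1; omega
                simpa [List.length_eq_zero_iff] using this
              subst ht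
              simp [solLoopA, solLoopL, hK, h1]
            · -- at least two elements
              have hn1 : 1 ≤ n := by rw [hsz] at h1; omega
              have htms : (PyHeap.merge hl hr).toMS = ↑t := by
                have : a ::ₘ (PyHeap.merge hl hr).toMS = a ::ₘ ↑t := by
                  rw [PyHeap.toMS_merge]
                  simpa [PyHeap.toMS, Multiset.cons_coe] using hms
                exact (Multiset.cons_inj_right _).mp this
              cases t with
              | nil => simp at hlen; omega
              | cons y rest =>
                cases hm : PyHeap.merge hl hr with
                | nil =>
                    have := congrArg Multiset.card htms
                    simp [hm, PyHeap.toMS] at this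
                | node b l2 r2 =>
                  have hom : (PyHeap.node b l2 r2).Ordered := by
                    rw [← hm]; exact PyHeap.ordered_merge hl hr ho.2.1 ho.2.2
                  have hms2 : (PyHeap.node b l2 r2).toMS = ↑(y :: rest) := by rw [← hm]; exact htms
                  have hst : (y :: rest).Pairwise (· ≤ ·) := (List.pairwise_cons.mp hs).2
                  have hyb : b = y := (head_eq_root b l2 r2 y rest hom hms2 hst).symm
                  subst hyb
                  have hrest : l2.toMS + r2.toMS = ↑rest := by
                    have : b ::ₘ (l2.toMS + r2.toMS) = b ::ₘ ↑rest := by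
                      simpa [PyHeap.toMS, Multiset.cons_coe] using hms2
                    exact (Multiset.cons_inj_right _).mp this
                  have hrec := ih K (PyHeap.push (a + b * 2) (PyHeap.merge l2 r2))
                      (insortR (a + b * 2) rest) (num + 1)
                      (by
                        have hc := congrArg Multiset.card hms2
                        rw [PyHeap.card_toMS] at hc
                        simp [PyHeap.size] at hc
                        simp only [PyHeap.push, PyHeap.size_merge, PyHeap.size]
                        simp [PyHeap.size] at hsz
                        simp at hlen
                        omega)
                      (PyHeap.ordered_push _ _ (PyHeap.ordered_merge l2 r2 hom.2.1 hom.2.2))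
                      (by rw [PyHeap.toMS_push, PyHeap.toMS_merge, hrest, insortR_coe])
                      (insortR_pairwise _ _ (List.pairwise_cons.mp hst).2)
                  simp only [solLoopA, solLoopL, ge_iff_le, if_neg (by omega : ¬ K ≤ a),
                    if_neg h1, hm]
                  exact hrec

-- ---------- B-side lemmas (two queues ≍ sorted list) ----------

-- the virtual sorted view of B's state: the standard merge of the two queues
def mergeL : List Int → List Int → List Int
  | [], q => q
  | x :: bs, [] => x :: bs
  | x :: bs, y :: q =>
    if x ≤ y then x :: mergeL bs (y :: q) else y :: mergeL (x :: bs) q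
termination_by bs q => bs.length + q.length
decreasing_by all_goals (first | (simp; omega) | simp | omega)

theorem mergeL_nil (bs : List Int) : mergeL bs [] = bs := by
  cases bs <;> simp [mergeL]

theorem popQ_mergeL (bs q : List Int) (h : mergeL bs q ≠ []) :
    mergeL bs q = (popQ bs q).1 :: mergeL (popQ bs q).2.1 (popQ bs q).2.2 := by
  cases bs with
  | nil =>
      cases q with
      | nil => simp [mergeL] at h
      | cons y q => simp [mergeL, popQ]
  | cons x bs =>
      cases q with
      | nil => simp [mergeL, popQ, mergeL_nil]
      | cons y q => by_cases hxy : x ≤ y <;> simp [mergeL, popQ, hxy]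

theorem mergeL_perm (bs q : List Int) : (mergeL bs q).Perm (bs ++ q) := by
  induction bs, q using mergeL.induct with
  | case1 q => simp [mergeL]
  | case2 x bs => simp [mergeL]
  | case3 x bs y q hxy ih => simpa [mergeL, hxy] using ih
  | case4 x bs y q hxy ih =>
      simp only [mergeL, if_neg hxy]
      exact ((ih.cons y).trans List.perm_middle.symm)

theorem length_mergeL (bs q : List Int) : (mergeL bs q).length = bs.length + q.length := by
  simpa using (mergeL_perm bs q).length_eq

theorem mem_mergeL (z : Int) (bs q : List Int) : z ∈ mergeL bs q ↔ z ∈ bs ∨ z ∈ q := by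
  rw [(mergeL_perm bs q).mem_iff]; simp

theorem insortR_all_le (v : Int) (q : List Int) (h : ∀ y ∈ q, y ≤ v) :
    insortR v q = q ++ [v] := by
  induction q with
  | nil => simp [insortR]
  | cons y q ih =>
      have hy : y ≤ v := h y (by simp)
      simp only [insortR, if_neg (by omega : ¬ v < y), List.cons_append]
      rw [ih (fun z hz => h z (by simp [hz]))]

theorem mergeL_single (v : Int) (bs : List Int) : mergeL bs [v] = insortR v bs := by
  induction bs with
  | nil => simp [mergeL, insortR]
  | cons x bs ih =>
      by_cases hxv : x ≤ v
      · simp only [mergeL, if_pos hxv, insortR, if_neg (by omega : ¬ v < x)]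
        rw [ih]
      · simp only [mergeL, if_neg hxv, insortR, if_pos (by omega : v < x), mergeL_nil]

theorem insort_mergeL (v : Int) (bs q : List Int) (h : ∀ y ∈ q, y ≤ v) :
    insortR v (mergeL bs q) = mergeL bs (q ++ [v]) := by
  induction bs, q using mergeL.induct with
  | case1 q => simp only [mergeL]; exact insortR_all_le v q h
  | case2 x bs => simpa [mergeL_nil] using (mergeL_single v (x :: bs)).symm
  | case3 x bs y q hxy ih =>
      have hyv : y ≤ v := h y (by simp)
      simp only [mergeL, if_pos hxy, List.cons_append, insortR,
        if_neg (by omega : ¬ v < x)]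
      rw [ih h]
      simp [mergeL, hxy]
  | case4 x bs y q hxy ih =>
      have hyv : y ≤ v := h y (by simp)
      simp only [mergeL, if_neg hxy, List.cons_append, insortR,
        if_neg (by omega : ¬ v < y)]
      rw [ih (fun z hz => h z (by simp [hz]))]

theorem popQ_bs_sublist (bs q : List Int) : (popQ bs q).2.1.Sublist bs := by
  cases bs with
  | nil => cases q <;> simp [popQ]
  | cons x bs =>
      cases q with
      | nil => simp [popQ]
      | cons y q => by_cases hxy : x ≤ y <;> simp [popQ, hxy]

theorem popQ_q_sublist (bs q : List Int) : (popQ bs q).2.2.Sublist q := by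
  cases bs with
  | nil => cases q <;> simp [popQ]
  | cons x bs =>
      cases q with
      | nil => simp [popQ]
      | cons y q => by_cases hxy : x ≤ y <;> simp [popQ, hxy]

-- every merged value still queued is ≤ 3 × the element just popped
theorem popQ_q_le (bs q : List Int)
    (h3 : q.Pairwise (fun p r => r ≤ 3 * p))
    (hqb : ∀ m ∈ q, ∀ x ∈ bs, m ≤ 3 * x) :
    ∀ m ∈ (popQ bs q).2.2, m ≤ 3 * (popQ bs q).1 := by
  cases bs with
  | nil =>
      cases q with
      | nil => simp [popQ]
      | cons y q =>
          simpa [popQ] using (List.pairwise_cons.mp h3).1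
  | cons x bs =>
      cases q with
      | nil => simp [popQ]
      | cons y q =>
          by_cases hxy : x ≤ y
          · simp only [popQ, if_pos hxy]
            intro m hm
            exact hqb m hm x (by simp)
          · simp only [popQ, if_neg hxy]
            exact (List.pairwise_cons.mp h3).1

theorem loopB_eq (fuel : Nat) : ∀ (K : Int) (bs q : List Int) (num : Int),
    (mergeL bs q).Pairwise (· ≤ ·) →
    q.Pairwise (fun p r => r ≤ 3 * p) →
    (∀ m ∈ q, ∀ x ∈ bs, m ≤ 3 * x) →
    mergeL bs q ≠ [] →
    solLoopB fuel K bs q num = solLoopL fuel K (mergeL bs q) num := by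
  induction fuel with
  | zero => intro K bs q num _ _ _ _; rfl
  | succ fuel ih =>
      intro K bs q num hl h3 hqb hne
      have hhd := popQ_mergeL bs q hne
      have hlen := length_mergeL bs q
      rcases hp1 : popQ bs q with ⟨a, bs1, q1⟩
      rw [hp1] at hhd
      simp only at hhd
      by_cases hK : a ≥ K
      · -- both return num immediately
        rw [hhd]
        cases hmt : mergeL bs1 q1 with
        | nil => simp [solLoopB, solLoopL, hp1, hK]
        | cons b rest => simp [solLoopB, solLoopL, hp1, hK]
      · by_cases h1 : bs.length + q.length = 1
        · -- single element: both return -1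
          have hone : (mergeL bs q).length = 1 := by omega
          rw [hhd] at hone
          have ht : mergeL bs1 q1 = [] := by
            have : (mergeL bs1 q1).length = 0 := by simpa using hone
            simpa [List.length_eq_zero_iff] using this
          rw [hhd, ht]
          simp [solLoopB, solLoopL, hp1, hK, h1]
        · -- at least two elements
          have hne2 : mergeL bs1 q1 ≠ [] := by
            intro hc
            rw [hhd, hc] at hlen
            simp at hlen
            omega
          have hhd2 := popQ_mergeL bs1 q1 hne2
          rcases hp2 : popQ bs1 q1 with ⟨b, bs2, q2⟩
          rw [hp2] at hhd2
          simp only at hhd2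
          -- sortedness facts from the merged view
          have hlsort : (a :: b :: mergeL bs2 q2).Pairwise (· ≤ ·) := by
            rw [hhd, hhd2] at hl; exact hl
          have hab : a ≤ b := (List.pairwise_cons.mp hlsort).1 b (by simp)
          have hbrest : ∀ z ∈ mergeL bs2 q2, b ≤ z :=
            (List.pairwise_cons.mp (List.pairwise_cons.mp hlsort).2).1
          -- invariant transfer to the popped state
          have hq1sub := popQ_q_sublist bs q
          have hbs1sub := popQ_bs_sublist bs q
          rw [hp1] at hq1sub hbs1sub
          simp only at hq1sub hbs1sub
          have hq2sub' := popQ_q_sublist bs1 q1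
          have hbs2sub' := popQ_bs_sublist bs1 q1
          rw [hp2] at hq2sub' hbs2sub'
          simp only at hq2sub' hbs2sub'
          have h3a := popQ_q_le bs q h3 hqb
          rw [hp1] at h3a
          simp only at h3a
          have h3' : q1.Pairwise (fun p r => r ≤ 3 * p) := h3.sublist hq1sub
          have hqb' : ∀ m ∈ q1, ∀ x ∈ bs1, m ≤ 3 * x := fun m hm x hx =>
            hqb m (hq1sub.subset hm) x (hbs1sub.subset hx)
          have hq2rest : ∀ m ∈ q2, m ∈ mergeL bs2 q2 := fun m hm =>
            (mem_mergeL m bs2 q2).mpr (Or.inr hm)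
          have hbs2rest : ∀ x ∈ bs2, x ∈ mergeL bs2 q2 := fun x hx =>
            (mem_mergeL x bs2 q2).mpr (Or.inl hx)
          have hN1 : ∀ m ∈ q2, m ≤ a + 2 * b := by
            intro m hm
            have := h3a m (hq2sub'.subset hm)
            omega
          have hN2 : ∀ x ∈ bs2, a + 2 * b ≤ 3 * x := by
            intro x hx
            have := hbrest x (hbs2rest x hx)
            omega
          have hN3 : ∀ m ∈ q2, a + 2 * b ≤ 3 * m := by
            intro m hm
            have := hbrest m (hq2rest m hm)
            omega
          have hmrg : mergeL bs2 (q2 ++ [a + 2 * b]) = insortR (a + 2 * b) (mergeL bs2 q2) :=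
            (insort_mergeL (a + 2 * b) bs2 q2 hN1).symm
          -- re-established invariants
          have hrsort : (mergeL bs2 q2).Pairwise (· ≤ ·) :=
            (List.pairwise_cons.mp (List.pairwise_cons.mp hlsort).2).2
          have hlI : (mergeL bs2 (q2 ++ [a + 2 * b])).Pairwise (· ≤ ·) := by
            rw [hmrg]; exact insortR_pairwise _ _ hrsort
          have h3I : (q2 ++ [a + 2 * b]).Pairwise (fun p r => r ≤ 3 * p) := by
            rw [List.pairwise_append]
            refine ⟨h3'.sublist hq2sub', by simp, ?_⟩
            intro m hm w hw
            rcases List.mem_singleton.mp hw with rfl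
            exact hN3 m hm
          have hqbI : ∀ m ∈ q2 ++ [a + 2 * b], ∀ x ∈ bs2, m ≤ 3 * x := by
            intro m hm x hx
            rcases List.mem_append.mp hm with hm | hm
            · exact hqb' m (hq2sub'.subset hm) x (hbs2sub'.subset hx)
            · rcases List.mem_singleton.mp hm with rfl
              exact hN2 x hx
          have hneI : mergeL bs2 (q2 ++ [a + 2 * b]) ≠ [] := by
            rw [hmrg]
            cases mergeL bs2 q2 with
            | nil => simp [insortR]
            | cons z t => simp only [insortR]; split <;> simp
          have hrec := ih K bs2 (q2 ++ [a + 2 * b]) (num + 1) hlI h3I hqbI hneI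
          rw [hmrg] at hrec
          have hv2 : a + b * 2 = a + 2 * b := by ring
          rw [hhd, hhd2]
          simp only [solLoopB, solLoopL, hp1, hp2, hv2]
          rw [if_neg (by omega : ¬ a ≥ K), if_neg h1, if_neg (by omega : ¬ a ≥ K)]
          exact hrec

-- ===== VERDICT (by name: the statement is the Claim_ definition above) =====
theorem solution_spec : Claim_equal_solution := by
  intro sco K _ hpre
  unfold Spec_solution solution solution_alt
  have hsp : (PySem.List.sorted sco (fun x => x) false).Pairwise (· ≤ ·) := by
    simpa using PySem.List.sorted_pairwise (xs := sco) (key := fun x => x)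
  have hinv := heapifyL_invariant (PySem.List.sorted sco (fun x => x) false)
  have hlen : (PyHeap.heapifyL (PySem.List.sorted sco (fun x => x) false)).size
      = (PySem.List.sorted sco (fun x => x) false).length := by
    have := congrArg Multiset.card hinv.1
    simpa [PyHeap.card_toMS] using this
  have hsne : PySem.List.sorted sco (fun x => x) false ≠ [] := by
    intro hc
    exact hpre ((PySem.List.sorted_eq_nil_iff sco (fun x => x) false).mp hc)
  have hA : solLoopA (PyHeap.heapifyL (PySem.List.sorted sco (fun x => x) false)).size K
      (PyHeap.heapifyL (PySem.List.sorted sco (fun x => x) false)) 0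
      = solLoopL (PySem.List.sorted sco (fun x => x) false).length K
        (PySem.List.sorted sco (fun x => x) false) 0 := by
    rw [hlen]
    exact loop_eq _ K _ _ 0 (by rw [hlen]) hinv.2 hinv.1 hsp
  have hB := loopB_eq (PySem.List.sorted sco (fun x => x) false).length K
      (PySem.List.sorted sco (fun x => x) false) [] 0
      (by rw [mergeL_nil]; exact hsp) (by simp) (by simp)
      (by rw [mergeL_nil]; exact hsne)
  rw [hA, hB, mergeL_nil]
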